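-- pv_equiv track=rewrite | github.com/mfazza/Networks | Feistel.py | shuffleBlock
-- ===== SOURCE A (Python) =====
-- def padBinary(binary, paddingLen):                      #we need to make sure the binary strings only have 8 bits.
--     padding = ""                                        #so we pad the strings that don't.
--     for a in range(paddingLen - len(binary)):           #repeat for the difference between 8 and the current length
--         padding += "0"
--     return padding + binary
--
-- def shuffleBlock(block, subkey):                        #uses subkey of the round to shuffle plaintext
--     shuffledBinaryBlock = [[], [], [], [], [], [], [], []]
--                                                         #Since subkeys are in octal, this is a list of 8 lists.
--                                                         #the corresponding byte in the subkey determines where the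
--                                                         #bit will be placed within the lists
--     binaryBlock = ""
--     for a in block:                                     #loop for binary conversion
--         binaryBlock += getBinary(a, 8)
--     for a in range(len(binaryBlock)):                   #loop for shufflingshuffling
--         shuffledBinaryBlock[int(subkey[a % len(subkey)])].append(binaryBlock[a])
--     shuffledBlock = ""
--     for a in shuffledBinaryBlock:                       #loop to conver shuffledBinaryBlock into a string
--         for b in a:
--             shuffledBlock += b
--     shuffledBlockList = []
--     for a in range(len(block)):  # /len(block)):
--         shuffledBlockList.append(
--             int(shuffledBlock[a * 8:(a + 1) * 8], 2))   #makes shuffledBlock into a list of integers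
--     return shuffledBlockList                            #returns the list of integers
--
-- def getBinary(decimal, padding):                        #binary conversion
--     decimal = int(decimal)
--     binary = ''
--     if decimal == 0: decimal = 0
--     while decimal > 0:
--         binary = str(decimal % 2) + binary
--         decimal = decimal >> 1
--     binary = padBinary(binary, padding)                 #binary might need to padded to have length of 8
--     return binary
-- ===== SOURCE B (Python) =====
-- def shuffleBlock(block, subkey):
--     # Distributing bits into 8 octal buckets and concatenating them is a
--     # stable sort of the bit positions by their subkey digit.
--     bits = ''.join((format(v, 'b') if v > 0 else '').zfill(8) for v in block)
--     order = sorted(range(len(bits)), key=lambda i: int(subkey[i % len(subkey)]))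
--     shuffled = ''.join(bits[i] for i in order)
--     return [int(shuffled[8 * a:8 * a + 8], 2) for a in range(len(block))]
-- ===== Notes on version B (the rewrite author's own statement) =====
-- stated objective: idiomatic
-- what changed: The explicit 8-bucket distribution loop plus nested concatenation loops is replaced by a single stable sort of the bit indices by their octal subkey digit (order = sorted(range(nbits), key=digit)), and the hand-rolled while-loop binary conversion with a padding loop is replaced by format(v,'b').zfill(8); equivalence rests on stability of Python's sort.
import Mathlib
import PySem

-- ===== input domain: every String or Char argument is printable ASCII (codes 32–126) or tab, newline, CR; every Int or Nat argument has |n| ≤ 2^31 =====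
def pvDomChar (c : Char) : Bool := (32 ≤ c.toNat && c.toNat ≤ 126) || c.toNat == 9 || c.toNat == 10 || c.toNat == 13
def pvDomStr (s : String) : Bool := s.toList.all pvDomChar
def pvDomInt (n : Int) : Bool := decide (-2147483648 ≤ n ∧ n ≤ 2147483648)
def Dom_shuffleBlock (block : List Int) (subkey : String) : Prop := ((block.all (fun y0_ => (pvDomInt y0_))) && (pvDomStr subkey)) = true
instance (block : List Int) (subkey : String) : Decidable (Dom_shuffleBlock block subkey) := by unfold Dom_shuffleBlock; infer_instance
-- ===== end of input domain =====

-- B replaces A's 8-bucket distribution with a stable sort of bit indices by subkey digit,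
-- and the hand-rolled binary conversion with format(v,'b').zfill(8) (objective: idiomatic).

-- ===== PORT A =====

-- int(subkey[a % len(subkey)]): for a digit character c, int(c) = ord(c) - 48 (exact on
-- digits; Pre_ guarantees the accessed characters are '0'..'7').  Shared by both ports:
-- both Pythons contain this very expression.
def digIntP (sk : List Char) (a : Int) : Int :=
  ((PySem.List.pyGetD sk (PySem.Int.mod a (sk.length : Int)) '0').toNat : Int) - 48

-- padBinary: the padding loop "for a in range(paddingLen - len(binary)): padding += '0'"
def padBinaryA (binary : List Char) (paddingLen : Int) : List Char :=
  let padding := (PySem.List.pyRange 0 (paddingLen - (binary.length : Int)) 1).foldl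
    (fun p _ => p ++ ['0']) []
  padding ++ binary

-- getBinary's while loop: "while decimal > 0: binary = str(decimal % 2) + binary; decimal >>= 1"
-- (decimal >> 1 on a positive int is floor division by 2)
def getBinLoopA (decimal : Int) (binary : List Char) : List Char :=
  if 0 < decimal then
    getBinLoopA (PySem.Int.floordiv decimal 2) (PySem.Int.toChars (PySem.Int.mod decimal 2) ++ binary)
  else binary
termination_by decimal.toNat
decreasing_by
  have h2 : PySem.Int.floordiv decimal 2 = decimal / 2 := PySem.Int.floordiv_eq_ediv_of_pos (by omega)
  rw [h2]; omega

def getBinaryA (decimal : Int) (padding : Int) : List Char :=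
  padBinaryA (getBinLoopA decimal []) padding

def shuffleBlock (block : List Int) (subkey : String) : List Int :=
  let sk := subkey.toList
  -- binaryBlock = "" ; for a in block: binaryBlock += getBinary(a, 8)
  let binaryBlock := block.foldl (fun s a => s ++ getBinaryA a 8) []
  -- for a in range(len(binaryBlock)): shuffledBinaryBlock[int(subkey[a % len(subkey)])].append(binaryBlock[a])
  let sbb := (PySem.List.pyRange 0 (binaryBlock.length : Int) 1).foldl
    (fun bs a =>
      PySem.List.pySetD bs (digIntP sk a)
        (PySem.List.pyGetD bs (digIntP sk a) [] ++ [PySem.List.pyGetD binaryBlock a ' ']))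
    [[], [], [], [], [], [], [], []]
  -- shuffledBlock = "" ; for a in shuffledBinaryBlock: for b in a: shuffledBlock += b
  let shuffledBlock := sbb.foldl (fun s l => l.foldl (fun s2 b => s2 ++ [b]) s) []
  -- for a in range(len(block)): shuffledBlockList.append(int(shuffledBlock[a*8:(a+1)*8], 2))
  (PySem.List.pyRange 0 (block.length : Int) 1).foldl
    (fun out a =>
      out ++ [(PySem.Int.ofCharsBase? (PySem.List.slice shuffledBlock (some (a * 8)) (some ((a + 1) * 8))) 2).getD 0])
    []

-- ===== PORT B =====

-- format(v, 'b') for v > 0: binary digits, most significant first (empty for 0)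
def binRepB (n : Nat) : List Char :=
  if n = 0 then [] else binRepB (n / 2) ++ [if n % 2 = 1 then '1' else '0']

-- (format(v, 'b') if v > 0 else '').zfill(8)
def byteB (v : Int) : List Char :=
  let s := if 0 < v then binRepB v.toNat else []
  List.replicate (8 - s.length) '0' ++ s

def shuffleBlock_alt (block : List Int) (subkey : String) : List Int :=
  let sk := subkey.toList
  -- bits = ''.join((format(v,'b') if v > 0 else '').zfill(8) for v in block)
  let bits := (block.map byteB).flatten
  -- order = sorted(range(len(bits)), key=lambda i: int(subkey[i % len(subkey)]))
  let order := PySem.List.sorted (PySem.List.pyRange 0 (bits.length : Int) 1) (fun i => digIntP sk i) false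
  -- shuffled = ''.join(bits[i] for i in order)
  let shuffled := order.map (fun i => PySem.List.pyGetD bits i ' ')
  -- [int(shuffled[8*a:8*a+8], 2) for a in range(len(block))]
  (PySem.List.pyRange 0 (block.length : Int) 1).map
    (fun a => (PySem.Int.ofCharsBase? (PySem.List.slice shuffled (some (8 * a)) (some (8 * a + 8))) 2).getD 0)

-- ===== PRECONDITION & SPEC =====

-- length of getBinary(v, 8): 8, or v's bit length when v > 0 needs more than a byte
def bitsLenP (v : Int) : Nat := if 0 < v then max 8 (PySem.Int.bitLength v) else 8

-- total number of bits of the block's binary string; the subkey characters A reads are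
-- exactly those at positions < min(len(subkey), nbitsP block)
def nbitsP (block : List Int) : Nat := (block.map bitsLenP).sum

-- Exactly the inputs where A returns: no ZeroDivisionError (empty subkey with a nonempty
-- block), and every subkey character A actually reads is a digit '0'..'7' (a non-digit is
-- a ValueError in int(), a digit 8/9 an IndexError on the 8-element bucket list).
def Pre_shuffleBlock (block : List Int) (subkey : String) : Prop :=
  (block = [] ∨ subkey.toList ≠ []) ∧
  ∀ i ∈ List.range (min subkey.toList.length (nbitsP block)),
    subkey.toList.getD i ' ' ∈ (['0', '1', '2', '3', '4', '5', '6', '7'] : List Char)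

instance (block : List Int) (subkey : String) : Decidable (Pre_shuffleBlock block subkey) := by
  unfold Pre_shuffleBlock; infer_instance

def pvWitness_shuffleBlock : List Int × String := ([65, 66, 67], "01234567")

def Spec_shuffleBlock (block : List Int) (subkey : String) (out : List Int) : Prop := out = shuffleBlock_alt block subkey
instance (block : List Int) (subkey : String) (out : List Int) : Decidable (Spec_shuffleBlock block subkey out) := by unfold Spec_shuffleBlock; infer_instance

-- ===== CLAIM (what is proved, stated in full; the proofs are below) =====
def Claim_equal_shuffleBlock : Prop := ∀ (block : List Int) (subkey : String), Dom_shuffleBlock block subkey → Pre_shuffleBlock block subkey → Spec_shuffleBlock block subkey (shuffleBlock block subkey)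

-- ===== LEMMAS AND PROOFS =====

-- the padding loop appends one '0' per iteration
theorem pv_foldl_pad (l : List Int) (init : List Char) :
    l.foldl (fun p _ => p ++ ['0']) init = init ++ List.replicate l.length '0' := by
  induction l generalizing init with
  | nil => simp
  | cons x t ih => simp [List.foldl_cons, ih, List.replicate_succ]

-- A's while loop prepends exactly the binary digits binRepB produces
theorem pv_getBinLoop_eq (d : Int) (binary : List Char) :
    getBinLoopA d binary = binRepB d.toNat ++ binary := by
  by_cases h : 0 < d
  · rw [getBinLoopA]
    simp only [h, if_pos]
    have hfd : PySem.Int.floordiv d 2 = d / 2 := PySem.Int.floordiv_eq_ediv_of_pos (by omega)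
    have hmd : PySem.Int.mod d 2 = d % 2 := PySem.Int.mod_eq_emod_of_pos (by omega)
    have ih := pv_getBinLoop_eq (PySem.Int.floordiv d 2) (PySem.Int.toChars (PySem.Int.mod d 2) ++ binary)
    have hne : d.toNat ≠ 0 := by omega
    have h1 : (PySem.Int.floordiv d 2).toNat = d.toNat / 2 := by rw [hfd]; omega
    rw [ih, h1]
    conv_rhs => rw [binRepB]
    rw [if_neg hne]
    rcases Int.emod_two_eq_zero_or_one d with he | he
    · have hb : d.toNat % 2 = 0 := by omega
      rw [hb, hmd, he]
      simp only [if_neg (by omega : ¬ (0 : Nat) = 1)]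
      rw [show PySem.Int.toChars 0 = ['0'] from by decide]
      simp
    · have hb : d.toNat % 2 = 1 := by omega
      rw [hb, hmd, he]
      rw [show PySem.Int.toChars 1 = ['1'] from by decide]
      simp
  · rw [getBinLoopA, if_neg h]
    have h0 : d.toNat = 0 := by omega
    rw [h0, binRepB]
    simp
termination_by d.toNat
decreasing_by
  have h2 : PySem.Int.floordiv d 2 = d / 2 := PySem.Int.floordiv_eq_ediv_of_pos (by omega)
  rw [h2]; omega

theorem pv_binRep_nil (v : Int) (h : ¬ 0 < v) : binRepB v.toNat = [] := by
  have h0 : v.toNat = 0 := by omega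
  rw [h0, binRepB]; simp

theorem pv_pad_eq (binary : List Char) :
    padBinaryA binary 8 = List.replicate (8 - binary.length) '0' ++ binary := by
  unfold padBinaryA
  rw [pv_foldl_pad]
  simp only [List.nil_append, PySem.List.length_pyRange_one]
  congr 2
  omega

-- A's getBinary(v, 8) is B's zfill'd format
theorem pv_byte_eq (v : Int) : getBinaryA v 8 = byteB v := by
  unfold getBinaryA
  rw [pv_getBinLoop_eq]
  simp only [List.append_nil]
  rw [pv_pad_eq]
  unfold byteB
  by_cases h : 0 < v
  · simp [h]
  · rw [pv_binRep_nil v h]; simp [h]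

-- length of a binary representation is the bit length
theorem pv_binRep_length (n : Nat) : (binRepB n).length = PySem.Int.bitLength (n : Int) := by
  by_cases h : n = 0
  · rw [h, binRepB]; simp [PySem.Int.bitLength_zero]
  · rw [binRepB, if_neg h]
    rw [PySem.Int.bitLength_natCast (m := n) (by omega)]
    rw [List.length_append, pv_binRep_length (n / 2)]
    simp
termination_by n
decreasing_by omega

theorem pv_byte_length (v : Int) : (byteB v).length = bitsLenP v := by
  unfold byteB bitsLenP
  by_cases h : 0 < v
  · simp only [h, if_pos]
    have hb : (binRepB v.toNat).length = PySem.Int.bitLength v := by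
      rw [pv_binRep_length]
      congr 1
      omega
    simp [hb]
    omega
  · simp [h]


-- insertBy places x in front when it sorts before everything present
theorem pv_insertBy_front {α : Type} (before : α → α → Bool) (x : α) (R : List α)
    (h : ∀ b ∈ R, before x b = true) : PySem.List.insertBy before x R = x :: R := by
  cases R with
  | nil => rfl
  | cons b t => simp [PySem.List.insertBy, h b (by simp)]

-- insertBy skips a prefix x does not sort before
theorem pv_insertBy_append {α : Type} (before : α → α → Bool) (x : α) (L R : List α)
    (h : ∀ a ∈ L, before x a = false) :
    PySem.List.insertBy before x (L ++ R) = L ++ PySem.List.insertBy before x R := by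
  induction L with
  | nil => simp
  | cons a t ih =>
    simp only [List.cons_append, PySem.List.insertBy, h a (by simp)]
    simp only [Bool.false_eq_true, if_false]
    rw [ih (fun b hb => h b (by simp [hb]))]

-- inserting a new element into concatenated key buckets lands at the end of its bucket
theorem pv_insert_buckets (x : Int) (k : Int → Int) (xs : List Int) (ks : List Int)
    (hks : ks.Pairwise (· < ·)) (hx : k x ∈ ks) :
    PySem.List.insertBy (fun a b => decide (k a < k b)) x
        ((ks.map (fun d => xs.filter (fun y => decide (k y = d)))).flatten)
      = (ks.map (fun d => (xs ++ [x]).filter (fun y => decide (k y = d)))).flatten := by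
  induction ks with
  | nil => simp at hx
  | cons d ks' ih =>
    have hlt : ∀ d' ∈ ks', d < d' := (List.pairwise_cons.mp hks).1
    have hks' : ks'.Pairwise (· < ·) := (List.pairwise_cons.mp hks).2
    simp only [List.map_cons, List.flatten_cons]
    by_cases hkd : k x = d
    · rw [pv_insertBy_append _ _ _ _ ?hL]
      case hL =>
        intro a ha
        have : k a = d := by simpa using (List.mem_filter.mp ha).2
        simp [hkd, this]
      rw [pv_insertBy_front _ _ _ ?hR]
      case hR =>
        intro b hb
        obtain ⟨l, hl, hbl⟩ := List.mem_flatten.mp hb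
        obtain ⟨d', hd', rfl⟩ := List.mem_map.mp hl
        have hkb : k b = d' := by simpa using (List.mem_filter.mp hbl).2
        have hdd' := hlt d' hd'
        simp only [hkd, hkb, decide_eq_true_eq]
        omega
      have h1 : (xs ++ [x]).filter (fun y => decide (k y = d)) =
          xs.filter (fun y => decide (k y = d)) ++ [x] := by
        rw [List.filter_append]; simp [hkd]
      have h2 : ∀ d' ∈ ks', (xs ++ [x]).filter (fun y => decide (k y = d')) =
          xs.filter (fun y => decide (k y = d')) := by
        intro d' hd'
        rw [List.filter_append]
        have := hlt d' hd'
        have : ¬ (k x = d') := by omega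
        simp [this]
      rw [h1, List.map_congr_left h2]
      simp
    · have hx' : k x ∈ ks' := by
        rcases List.mem_cons.mp hx with h | h
        · exact absurd h hkd
        · exact h
      rw [pv_insertBy_append _ _ _ _ ?hL2]
      case hL2 =>
        intro a ha
        have hka : k a = d := by simpa using (List.mem_filter.mp ha).2
        have := hlt (k x) hx'
        simp [hka]; omega
      rw [ih hks' hx']
      have h1 : (xs ++ [x]).filter (fun y => decide (k y = d)) =
          xs.filter (fun y => decide (k y = d)) := by
        rw [List.filter_append]; simp [hkd]
      rw [h1]

-- a stable sort by a key ranging over a strictly increasing key list is the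
-- concatenation of the key buckets (in input order)
theorem pv_sorted_eq_buckets (xs : List Int) (k : Int → Int) (ks : List Int)
    (hks : ks.Pairwise (· < ·)) (hcov : ∀ x ∈ xs, k x ∈ ks) :
    PySem.List.sorted xs k false = (ks.map (fun d => xs.filter (fun x => decide (k x = d)))).flatten := by
  induction xs using List.reverseRecOn with
  | nil => simp [PySem.List.sorted]
  | append_singleton xs x ih =>
    have hsx : PySem.List.sorted (xs ++ [x]) k false =
        PySem.List.insertBy (fun a b => decide (k a < k b)) x (PySem.List.sorted xs k false) := by
      rw [PySem.List.sorted_eq_foldl_insertBy, List.foldl_append, ← PySem.List.sorted_eq_foldl_insertBy]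
      rfl
    rw [hsx, ih (fun y hy => hcov y (by simp [hy]))]
    exact pv_insert_buckets x k xs ks hks (hcov x (by simp))

-- A's distribution loop fills bucket j with the bits whose digit is j, in input order
theorem pv_fold_buckets (k : Int → Int) (g : Int → Char) (xs : List Int) :
    ∀ (B : List (List Char)), B.length = 8 → (∀ a ∈ xs, 0 ≤ k a ∧ k a < 8) →
    xs.foldl (fun bs a =>
        PySem.List.pySetD bs (k a) (PySem.List.pyGetD bs (k a) [] ++ [g a])) B
      = (List.range 8).map (fun j => B.getD j [] ++ (xs.filter (fun a => decide (k a = (j : Int)))).map g) := by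
  induction xs with
  | nil =>
    intro B hB _
    simp only [List.foldl_nil, List.filter_nil, List.map_nil, List.append_nil]
    apply List.ext_getElem
    · simp [hB]
    · intro i h1 h2
      simp only [List.getElem_map, List.getElem_range]
      rw [List.getD_eq_getElem]
  | cons a t ih =>
    intro B hB hx
    obtain ⟨ha0, ha8⟩ := hx a (by simp)
    have hkd : k a = ((k a).toNat : Int) := (Int.toNat_of_nonneg ha0).symm
    have hd8 : (k a).toNat < 8 := by omega
    simp only [List.foldl_cons]
    rw [ih _ (by rw [PySem.List.length_pySetD]; exact hB) (fun b hb => hx b (by simp [hb]))]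
    apply List.map_congr_left
    intro j hj
    have hj8 : j < 8 := List.mem_range.mp hj
    have hgd : (PySem.List.pySetD B (k a) (PySem.List.pyGetD B (k a) [] ++ [g a])).getD j [] =
        if j = (k a).toNat then PySem.List.pyGetD B ((k a).toNat : Int) [] ++ [g a]
        else PySem.List.pyGetD B (j : Int) [] := by
      rw [← PySem.List.pyGetD_natCast]
      rw [hkd]
      exact PySem.List.pyGetD_pySetD_natCast B ((k a).toNat) j _ [] (by omega)
    rw [hgd]
    rw [List.filter_cons]
    by_cases hje : j = (k a).toNat
    · have hd : decide (k a = (j : Int)) = true := by simp; omega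
      rw [hd]
      simp only [hje]
      rw [← PySem.List.pyGetD_natCast]
      simp
    · have hd : decide (k a = (j : Int)) = false := by simp; omega
      rw [hd]
      simp only [if_neg hje]
      rw [← PySem.List.pyGetD_natCast]
      simp

-- r % L ≤ r for a nonnegative dividend
theorem pv_mod_le (a L : Int) (h : 0 ≤ a) (hL : 0 < L) : PySem.Int.mod a L ≤ a := by
  rw [PySem.Int.mod_eq_emod_of_pos hL]
  by_cases hlt : a < L
  · rw [Int.emod_eq_of_lt h hlt]
  · have := Int.emod_lt_of_pos a hL
    omega

-- nested concatenation loops flatten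
theorem pv_foldl_flatten (L : List (List Char)) :
    L.foldl (fun s l => l.foldl (fun s2 b => s2 ++ [b]) s) [] = L.flatten := by
  have h : (fun (s : List Char) l => l.foldl (fun s2 b => s2 ++ [b]) s) =
      (fun (s : List Char) l => s ++ l) := by
    funext s l; exact PySem.List.foldl_append_singleton l s
  rw [h]
  have := PySem.List.foldl_append_eq_flatMap (fun l : List Char => l) L []
  simpa using this

-- the binary strings of the two ports agree, and their length is nbitsP
theorem pv_bits_eq (block : List Int) :
    block.foldl (fun s a => s ++ getBinaryA a 8) [] = (block.map byteB).flatten := by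
  rw [PySem.List.foldl_append_eq_flatMap]
  simp only [List.nil_append, List.flatMap_def]
  congr 1
  exact List.map_congr_left (fun a _ => pv_byte_eq a)

theorem pv_bits_length (block : List Int) : ((block.map byteB).flatten).length = nbitsP block := by
  rw [List.length_flatten, List.map_map]
  unfold nbitsP
  congr 1
  exact List.map_congr_left (fun a _ => pv_byte_length a)

-- under Pre_, every accessed subkey digit is an octal digit
theorem pv_digit_bound (block : List Int) (subkey : String) (hpre : Pre_shuffleBlock block subkey) :
    ∀ a ∈ PySem.List.pyRange 0 (((block.map byteB).flatten).length : Int) 1,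
      0 ≤ digIntP subkey.toList a ∧ digIntP subkey.toList a < 8 := by
  obtain ⟨hz, hdig⟩ := hpre
  intro a ha
  rw [PySem.List.mem_pyRange_one] at ha
  obtain ⟨ha0, han⟩ := ha
  set sk := subkey.toList with hsk
  have hskne : sk ≠ [] := by
    rcases hz with hb | hs
    · exfalso
      rw [hb] at han
      simp at han
      omega
    · exact hs
  have hL : (0 : Int) < (sk.length : Int) := by
    have : sk.length ≠ 0 := fun h => hskne (List.eq_nil_of_length_eq_zero h)
    omega
  have hm0 : 0 ≤ PySem.Int.mod a (sk.length : Int) := PySem.Int.mod_nonneg a hL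
  have hmL : PySem.Int.mod a (sk.length : Int) < (sk.length : Int) := PySem.Int.mod_lt a hL
  have hma : PySem.Int.mod a (sk.length : Int) ≤ a := pv_mod_le a _ ha0 hL
  have hiL : (PySem.Int.mod a (sk.length : Int)).toNat < sk.length := by omega
  have hin : (PySem.Int.mod a (sk.length : Int)).toNat < nbitsP block := by
    have := pv_bits_length block
    omega
  have hmem := hdig ((PySem.Int.mod a (sk.length : Int)).toNat) (List.mem_range.mpr (by omega))
  unfold digIntP
  rw [show PySem.Int.mod a (sk.length : Int) =
        (((PySem.Int.mod a (sk.length : Int)).toNat : Nat) : Int) from by omega,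
      PySem.List.pyGetD_natCast]
  have hdd : sk.getD ((PySem.Int.mod a (sk.length : Int)).toNat) '0' =
      sk.getD ((PySem.Int.mod a (sk.length : Int)).toNat) ' ' := by
    rw [List.getD_eq_getElem sk '0' hiL, List.getD_eq_getElem sk ' ' hiL]
  rw [hdd]
  have hc : 48 ≤ (sk.getD ((PySem.Int.mod a (sk.length : Int)).toNat) ' ').toNat ∧
      (sk.getD ((PySem.Int.mod a (sk.length : Int)).toNat) ' ').toNat ≤ 55 := by
    simp only [List.mem_cons, List.not_mem_nil, or_false] at hmem
    rcases hmem with h|h|h|h|h|h|h|h <;> rw [h] <;> decide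
  omega

-- the two shuffled bit strings coincide
theorem pv_shuffled_eq (block : List Int) (subkey : String) (hpre : Pre_shuffleBlock block subkey) :
    ((PySem.List.pyRange 0 (((block.map byteB).flatten).length : Int) 1).foldl
      (fun bs a =>
        PySem.List.pySetD bs (digIntP subkey.toList a)
          (PySem.List.pyGetD bs (digIntP subkey.toList a) [] ++
            [PySem.List.pyGetD ((block.map byteB).flatten) a ' ']))
      [[], [], [], [], [], [], [], []]).foldl (fun s l => l.foldl (fun s2 b => s2 ++ [b]) s) []
    = (PySem.List.sorted (PySem.List.pyRange 0 (((block.map byteB).flatten).length : Int) 1)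
        (fun i => digIntP subkey.toList i) false).map
        (fun i => PySem.List.pyGetD ((block.map byteB).flatten) i ' ') := by
  set sk := subkey.toList with hsk
  set bits := (block.map byteB).flatten with hbits
  set xs := PySem.List.pyRange 0 ((bits.length : Int)) 1 with hxs
  have hdigb := pv_digit_bound block subkey hpre
  rw [← hsk] at hdigb
  rw [pv_foldl_flatten]
  rw [pv_fold_buckets (digIntP sk) (fun a => PySem.List.pyGetD bits a ' ') xs _ rfl hdigb]
  rw [pv_sorted_eq_buckets xs (digIntP sk) ([0, 1, 2, 3, 4, 5, 6, 7] : List Int)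
      (by decide)
      (by
        intro x hxm
        obtain ⟨h0, h8⟩ := hdigb x hxm
        simp only [List.mem_cons, List.not_mem_nil, or_false]
        omega)]
  rw [List.map_flatten, List.map_map]
  rw [show ([0, 1, 2, 3, 4, 5, 6, 7] : List Int) = (List.range 8).map (fun j => (j : Int)) from by decide]
  rw [List.map_map]
  congr 1

theorem pv_main (block : List Int) (subkey : String) (hpre : Pre_shuffleBlock block subkey) :
    shuffleBlock block subkey = shuffleBlock_alt block subkey := by
  unfold shuffleBlock shuffleBlock_alt
  simp only [pv_bits_eq]
  rw [PySem.List.foldl_append_singleton_eq_map]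
  simp only [List.nil_append]
  rw [pv_shuffled_eq block subkey hpre]
  apply List.map_congr_left
  intro a _
  have h1 : a * 8 = 8 * a := by ring
  have h2 : (a + 1) * 8 = 8 * a + 8 := by ring
  rw [h1, h2]

-- ===== VERDICT (by name: the statement is the Claim_ definition above) =====
theorem shuffleBlock_spec : Claim_equal_shuffleBlock := by
  intro block subkey _ hpre
  unfold Spec_shuffleBlock
  exact pv_main block subkey hpre
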